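-- pv_equiv track=rewrite | github.com/frappe/lms | env/lib/python3.11/site-packages/zxcvbn/matching.py | enumerate_l33t_subs
-- ===== SOURCE A (Python) =====
-- def enumerate_l33t_subs(table):
--     keys = list(table.keys())
--     subs = [[]]
--
--     def dedup(subs):
--         deduped = []
--         members = {}
--         for sub in subs:
--             assoc = [(k, v) for v, k in sub]
--             assoc.sort()
--             label = '-'.join([k + ',' + str(v) for k, v in assoc])
--             if label not in members:
--                 members[label] = True
--                 deduped.append(sub)
--
--         return deduped
--
--     def helper(keys, subs):
--         if not len(keys):
--             return subs
--
--         first_key = keys[0]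
--         rest_keys = keys[1:]
--         next_subs = []
--         for l33t_chr in table[first_key]:
--             for sub in subs:
--                 dup_l33t_index = -1
--                 for i in range(len(sub)):
--                     if sub[i][0] == l33t_chr:
--                         dup_l33t_index = i
--                         break
--                 if dup_l33t_index == -1:
--                     sub_extension = list(sub)
--                     sub_extension.append([l33t_chr, first_key])
--                     next_subs.append(sub_extension)
--                 else:
--                     sub_alternative = list(sub)
--                     sub_alternative.pop(dup_l33t_index)
--                     sub_alternative.append([l33t_chr, first_key])
--                     next_subs.append(sub)
--                     next_subs.append(sub_alternative)
--
--         subs = dedup(next_subs)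
--         return helper(rest_keys, subs)
--
--     subs = helper(keys, subs)
--     sub_dicts = []  # convert from assoc lists to dicts
--     for sub in subs:
--         sub_dict = {}
--         for l33t_chr, chr in sub:
--             sub_dict[l33t_chr] = chr
--         sub_dicts.append(sub_dict)
--
--     return sub_dicts
-- ===== SOURCE B (Python) =====
-- def enumerate_l33t_subs(table):
--     def branch(sub, c, key):
--         keep = [e for e in sub if e[0] != c]
--         if len(keep) == len(sub):
--             return [sub + [[c, key]]]
--         return [sub, keep + [[c, key]]]
--
--     def label(sub):
--         return '-'.join(k + ',' + c for k, c in sorted((k, c) for c, k in sub))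
--
--     def dedup(subs, seen):
--         if not subs:
--             return []
--         head, tail = subs[0], subs[1:]
--         lab = label(head)
--         if lab in seen:
--             return dedup(tail, seen)
--         return [head] + dedup(tail, seen | {lab})
--
--     subs = [[]]
--     for key, chars in table.items():
--         subs = dedup([out for c in chars for sub in subs for out in branch(sub, c, key)], set())
--     return [dict(sub) for sub in subs]
-- ===== Notes on version B (the rewrite author's own statement) =====
-- stated objective: alternative
-- what changed: Replaces the recursive helper over the key list by an iterative fold over the dict items whose next generation is a flat comprehension over a branch helper (a filter instead of A's index scan + pop), and replaces the loop-with-dict dedup by a recursive dedup threading a set of labels.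
import Mathlib
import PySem

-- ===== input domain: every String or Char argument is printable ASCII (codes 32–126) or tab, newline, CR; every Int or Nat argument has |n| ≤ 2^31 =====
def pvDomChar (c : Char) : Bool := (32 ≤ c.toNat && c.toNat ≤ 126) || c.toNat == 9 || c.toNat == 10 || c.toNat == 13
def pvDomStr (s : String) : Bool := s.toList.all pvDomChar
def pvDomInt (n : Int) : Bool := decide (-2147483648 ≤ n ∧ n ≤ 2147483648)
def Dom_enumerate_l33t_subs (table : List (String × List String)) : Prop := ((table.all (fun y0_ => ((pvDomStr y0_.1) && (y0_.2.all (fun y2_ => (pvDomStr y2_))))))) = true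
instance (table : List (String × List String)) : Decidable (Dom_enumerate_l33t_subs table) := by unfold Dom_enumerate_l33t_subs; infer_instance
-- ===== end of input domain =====

-- B replaces A's recursive helper over the key list by an iterative fold over the items whose
-- next generation is a flat comprehension over a small branch helper (a filter instead of A's
-- index scan + pop), and replaces A's loop-with-dict dedup by a recursive dedup threading a set
-- of labels (objective: alternative decomposition). Return values proved equal on all inputs.

-- ===== PORT A =====
-- label = '-'.join(k + ',' + str(v) for (k, v) in sorted([(k, v) for v, k in sub]))
def pvLabelA (sub : List (String × String)) : List Char :=
  PySem.Chars.join ['-']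
    ((PySem.List.sorted2 (sub.map (fun e => (e.2, e.1))) Prod.fst Prod.snd false).map
      (fun p => p.1.toList ++ ',' :: p.2.toList))

-- dedup(subs): loop appending first sub per label, membership via a dict of labels
def pvDedupA (subs : List (List (String × String))) : List (List (String × String)) :=
  (subs.foldl (fun st sub =>
      if (PySem.Dict.contains st.2 (pvLabelA sub)) then st
      else (st.1 ++ [sub], PySem.Dict.insert st.2 (pvLabelA sub) true))
    (([], PySem.Dict.empty) : List (List (String × String)) × PySem.Dict (List Char) Bool)).1

-- one round of helper's body: build next_subs for first_key
def pvStepA (tbl : PySem.Dict String (List String)) (k : String)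
    (subs : List (List (String × String))) : List (List (String × String)) :=
  (tbl.getD k []).foldl (fun acc c =>
    subs.foldl (fun acc sub =>
      -- dup_l33t_index: first i with sub[i][0] == c, else -1
      match List.findIdx? (fun e => e.1 == c) sub with
      | none => acc ++ [sub ++ [(c, k)]]
      | some i => acc ++ [sub, sub.eraseIdx i ++ [(c, k)]]) acc) []

def pvHelperA (tbl : PySem.Dict String (List String)) :
    List String → List (List (String × String)) → List (List (String × String))
  | [], subs => subs
  | k :: rest, subs => pvHelperA tbl rest (pvDedupA (pvStepA tbl k subs))

def enumerate_l33t_subs (table : List (String × List String)) : List (List (String × String)) :=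
  let tbl := PySem.Dict.ofList table
  let subs := pvHelperA tbl (PySem.Dict.keys tbl) [[]]
  subs.map (fun sub =>
    PySem.Dict.items (sub.foldl (fun dd e => PySem.Dict.insert dd e.1 e.2) PySem.Dict.empty))

-- ===== PORT B =====
-- branch(sub, c, key): keep a filtered copy; one result if c is fresh, two otherwise
def pvBranchB (c key : String) (sub : List (String × String)) : List (List (String × String)) :=
  let keep := sub.filter (fun e => !(e.1 == c))
  if keep.length == sub.length then [sub ++ [(c, key)]]
  else [sub, keep ++ [(c, key)]]

-- label(sub) = '-'.join(k + ',' + c for k, c in sorted((k, c) for c, k in sub))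
def pvLabelB (sub : List (String × String)) : List Char :=
  PySem.Chars.join ['-']
    ((PySem.List.sorted2 (sub.map (fun e => (e.2, e.1))) Prod.fst Prod.snd false).map
      (fun p => p.1.toList ++ ',' :: p.2.toList))

-- dedup(subs, seen): structural recursion threading the seen set
def pvDedupB : List (List (String × String)) → PySem.Set (List Char) → List (List (String × String))
  | [], _ => []
  | h :: t, seen =>
    if PySem.Set.contains seen (pvLabelB h) then pvDedupB t seen
    else h :: pvDedupB t (PySem.Set.add seen (pvLabelB h))

def enumerate_l33t_subs_alt (table : List (String × List String)) : List (List (String × String)) :=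
  let tbl := PySem.Dict.ofList table
  let subs := (PySem.Dict.items tbl).foldl
      (fun subs p =>
        pvDedupB (p.2.flatMap (fun c => subs.flatMap (pvBranchB c p.1))) PySem.Set.empty) [[]]
  subs.map (fun sub => PySem.Dict.items (PySem.Dict.ofList sub))

-- ===== PRECONDITION & SPEC =====
def Spec_enumerate_l33t_subs (table : List (String × List String)) (out : List (List (String × String))) : Prop := out = enumerate_l33t_subs_alt table
instance (table : List (String × List String)) (out : List (List (String × String))) : Decidable (Spec_enumerate_l33t_subs table out) := by unfold Spec_enumerate_l33t_subs; infer_instance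

-- ===== CLAIM (what is proved, stated in full; the proofs are below) =====
def Claim_equal_enumerate_l33t_subs : Prop := ∀ (table : List (String × List String)), Dom_enumerate_l33t_subs table → Spec_enumerate_l33t_subs table (enumerate_l33t_subs table)

-- ===== LEMMAS AND PROOFS =====

-- the invariant: first components of a sub are distinct
def pvInv (sub : List (String × String)) : Prop := (sub.map Prod.fst).Nodup

-- A's per-(char, sub) contribution as a list
def pvGA (c k : String) (sub : List (String × String)) : List (List (String × String)) :=
  match List.findIdx? (fun e => e.1 == c) sub with
  | none => [sub ++ [(c, k)]]
  | some i => [sub, sub.eraseIdx i ++ [(c, k)]]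

theorem pv_flatMap_congr {α β : Type} (l : List α) (f g : α → List β)
    (h : ∀ a ∈ l, f a = g a) : l.flatMap f = l.flatMap g := by
  induction l with
  | nil => rfl
  | cons x t ih =>
    simp only [List.flatMap_cons, h x (List.mem_cons_self ..),
      ih (fun a ha => h a (List.mem_cons_of_mem _ ha))]

-- first-match removal equals filtering, when first components are distinct
theorem pv_filter_eq_eraseIdx (c : String) :
    ∀ (sub : List (String × String)) (i : Nat), pvInv sub →
      List.findIdx? (fun e => e.1 == c) sub = some i →
      sub.filter (fun e => !(e.1 == c)) = sub.eraseIdx i := by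
  intro sub
  induction sub with
  | nil => intro i _ h; rw [List.findIdx?_nil] at h; cases h
  | cons x t ih =>
    intro i hinv h
    rw [List.findIdx?_cons] at h
    by_cases hx : (x.1 == c) = true
    · simp [hx] at h
      subst h
      have hxc : x.1 = c := by exact beq_iff_eq.mp hx
      have hnot : x.1 ∉ t.map Prod.fst := by
        have hinv' := hinv
        rw [pvInv, List.map_cons, List.nodup_cons] at hinv'
        exact hinv'.1
      have hall : ∀ e ∈ t, (!(e.1 == c)) = true := by
        intro e he
        have : e.1 ≠ c := by
          intro hec
          exact hnot (by rw [hxc, ← hec]; exact List.mem_map_of_mem he)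
        simp [this]
      simp [hx, List.filter_eq_self.mpr hall, List.eraseIdx]
    · simp only [hx] at h
      cases h' : List.findIdx? (fun e => e.1 == c) t with
      | none => rw [h'] at h; simp at h
      | some j =>
        rw [h'] at h; simp at h
        subst h
        have htinv : pvInv t := by
          rw [pvInv, List.map_cons, List.nodup_cons] at hinv
          exact hinv.2
        simp [hx, List.eraseIdx, ih j htinv h']

-- A's branch (index scan + eraseIdx) equals B's branch (filter) on a sub with distinct firsts
theorem pv_branch_eq (c k : String) (sub : List (String × String)) (hinv : pvInv sub) :
    pvGA c k sub = pvBranchB c k sub := by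
  unfold pvGA pvBranchB
  cases h : List.findIdx? (fun e => e.1 == c) sub with
  | none =>
    have hall : ∀ e ∈ sub, (!(e.1 == c)) = true := by
      intro e he
      simp [List.findIdx?_eq_none_iff.mp h e he]
    simp [List.filter_eq_self.mpr hall]
  | some i =>
    have hfe := pv_filter_eq_eraseIdx c sub i hinv h
    have hlt : i < sub.length := (List.findIdx?_eq_some_iff_findIdx_eq.mp h).1
    have hlen : ((sub.eraseIdx i).length == sub.length) = false := by
      rw [List.length_eraseIdx]
      simp only [hlt, if_pos, beq_eq_false_iff_ne, ne_eq]
      omega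
    simp [hfe, hlen]

-- A's nested append loops compute the double flatMap over pvGA
theorem pv_stepA_flatMap (tbl : PySem.Dict String (List String)) (k : String)
    (subs : List (List (String × String))) :
    pvStepA tbl k subs = (tbl.getD k []).flatMap (fun c => subs.flatMap (pvGA c k)) := by
  unfold pvStepA
  have hinner : ∀ (c : String) (acc : List (List (String × String))),
      subs.foldl (fun acc sub =>
        match List.findIdx? (fun e => e.1 == c) sub with
        | none => acc ++ [sub ++ [(c, k)]]
        | some i => acc ++ [sub, sub.eraseIdx i ++ [(c, k)]]) acc
      = acc ++ subs.flatMap (pvGA c k) := by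
    intro c acc
    rw [show (fun (acc : List (List (String × String))) sub =>
        match List.findIdx? (fun e => e.1 == c) sub with
        | none => acc ++ [sub ++ [(c, k)]]
        | some i => acc ++ [sub, sub.eraseIdx i ++ [(c, k)]])
      = (fun acc sub => acc ++ pvGA c k sub) from funext fun acc => funext fun sub => by
        unfold pvGA; cases List.findIdx? (fun e => e.1 == c) sub <;> rfl]
    exact PySem.List.foldl_append_eq_flatMap (pvGA c k) subs acc
  rw [show (fun (acc : List (List (String × String))) c =>
      subs.foldl (fun acc sub =>
        match List.findIdx? (fun e => e.1 == c) sub with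
        | none => acc ++ [sub ++ [(c, k)]]
        | some i => acc ++ [sub, sub.eraseIdx i ++ [(c, k)]]) acc)
    = (fun acc c => acc ++ subs.flatMap (pvGA c k)) from funext fun acc => funext fun c =>
      hinner c acc]
  rw [PySem.List.foldl_append_eq_flatMap _]
  rfl

-- under the invariant, A's step is B's flat comprehension
theorem pv_step_eq (tbl : PySem.Dict String (List String)) (k : String)
    (chars : List String) (subs : List (List (String × String)))
    (hk : tbl.getD k [] = chars) (h : ∀ sub ∈ subs, pvInv sub) :
    pvStepA tbl k subs = chars.flatMap (fun c => subs.flatMap (pvBranchB c k)) := by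
  rw [pv_stepA_flatMap, hk]
  exact pv_flatMap_congr _ _ _ (fun c _ =>
    pv_flatMap_congr _ _ _ (fun sub hsub => pv_branch_eq c k sub (h sub hsub)))

-- A's dict-of-labels dedup loop computes B's recursive set-threading dedup
theorem pv_dedup_fold_eq :
    ∀ (l acc : List (List (String × String))) (d : PySem.Dict (List Char) Bool)
      (s : PySem.Set (List Char)), PySem.Dict.keys d = s →
    (l.foldl (fun st sub =>
        if (PySem.Dict.contains st.2 (pvLabelA sub)) then st
        else (st.1 ++ [sub], PySem.Dict.insert st.2 (pvLabelA sub) true)) (acc, d)).1 =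
    acc ++ pvDedupB l s := by
  intro l
  induction l with
  | nil => intro acc d s h; simp [pvDedupB]
  | cons x t ih =>
    intro acc d s h
    have hAB : pvLabelA x = pvLabelB x := rfl
    simp only [List.foldl_cons, pvDedupB]
    by_cases hc : PySem.Dict.contains d (pvLabelA x) = true
    · have hs : PySem.Set.contains s (pvLabelB x) = true := by
        rw [← hAB, ← h] at *
        rw [PySem.Set.contains_iff]
        rw [PySem.Dict.contains_eq_decide_mem_keys] at hc
        exact of_decide_eq_true hc
      simp only [hc, hs, if_true]
      exact ih acc d s h
    · have hs : PySem.Set.contains s (pvLabelB x) = false := by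
        rw [← hAB, ← h]
        rw [PySem.Dict.contains_eq_decide_mem_keys] at hc
        simp only [Bool.not_eq_true] at hc
        cases hmem : PySem.Set.contains (PySem.Dict.keys d) (pvLabelA x) with
        | false => rfl
        | true =>
          exact absurd (decide_eq_true ((PySem.Set.contains_iff _ _).mp hmem)) (by rw [hc]; simp)
      simp only [hc, hs, Bool.false_eq_true, if_false]
      have hkeq : PySem.Dict.keys (PySem.Dict.insert d (pvLabelA x) true)
          = PySem.Set.add s (pvLabelB x) := by
        rw [PySem.Dict.keys_insert_of_not_contains d true (by simpa using hc)]
        show PySem.Dict.keys d ++ [pvLabelA x] = PySem.Set.add s (pvLabelB x)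
        rw [← hAB, ← h, PySem.Set.add]
        rw [show PySem.Set.contains (PySem.Dict.keys d) (pvLabelA x) = false from by
          rw [← h] at hs; exact hs]
        simp
      rw [ih (acc ++ [x]) _ _ hkeq]
      simp

theorem pv_dedup_eq (l : List (List (String × String))) :
    pvDedupA l = pvDedupB l PySem.Set.empty := by
  unfold pvDedupA
  rw [pv_dedup_fold_eq l [] PySem.Dict.empty PySem.Set.empty rfl]
  rfl

-- every element of B's dedup output comes from the input list
theorem pv_mem_dedupB :
    ∀ (l : List (List (String × String))) (s : PySem.Set (List Char))
      (x : List (String × String)), x ∈ pvDedupB l s → x ∈ l := by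
  intro l
  induction l with
  | nil => intro s x h; cases h
  | cons y t ih =>
    intro s x h
    unfold pvDedupB at h
    by_cases hc : PySem.Set.contains s (pvLabelB y) = true
    · rw [if_pos hc] at h
      exact List.mem_cons_of_mem _ (ih _ x h)
    · rw [if_neg hc] at h
      rcases List.mem_cons.mp h with h1 | h1
      · exact h1 ▸ List.mem_cons_self ..
      · exact List.mem_cons_of_mem _ (ih _ x h1)

-- each result of pvBranchB has distinct first components, given its source does
theorem pv_branchB_inv (c key : String) (sub : List (String × String)) (hsub : pvInv sub) :
    ∀ x ∈ pvBranchB c key sub, pvInv x := by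
  intro x hx
  unfold pvBranchB at hx
  have hkeepinv : pvInv (sub.filter (fun e => !(e.1 == c)) ++ [(c, key)]) := by
    rw [pvInv, List.map_append, List.map_singleton]
    refine List.nodup_append.mpr
      ⟨List.Nodup.sublist (List.Sublist.map _ (List.filter_sublist)) hsub, (by simp), ?_⟩
    intro a ha b hb
    have hb2 := List.eq_of_mem_singleton hb
    subst hb2
    rcases List.mem_map.mp ha with ⟨e, he, hefst⟩
    have h3 := (List.mem_filter.mp he).2
    rw [hefst] at h3
    intro hac
    rw [hac] at h3
    simp at h3
  by_cases hlen : ((sub.filter (fun e => !(e.1 == c))).length == sub.length) = true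
  · rw [if_pos hlen] at hx
    rcases List.mem_singleton.mp hx with h1
    subst h1
    have hall : ∀ e ∈ sub, (!(e.1 == c)) = true :=
      List.length_filter_eq_length_iff.mp (by simpa using hlen)
    rw [pvInv, List.map_append, List.map_singleton]
    refine List.nodup_append.mpr ⟨hsub, (by simp), ?_⟩
    intro a ha b hb
    have hb2 := List.eq_of_mem_singleton hb
    subst hb2
    rcases List.mem_map.mp ha with ⟨e, he, hefst⟩
    have h3 := hall e he
    rw [hefst] at h3
    intro hac
    rw [hac] at h3
    simp at h3
  · rw [if_neg (by simpa using hlen)] at hx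
    rcases List.mem_cons.mp hx with h1 | h1
    · rw [h1]; exact hsub
    · rw [List.mem_singleton.mp h1]; exact hkeepinv

-- the invariant survives one generation of B's comprehension
theorem pv_stepB_inv (key : String) (chars : List String)
    (subs : List (List (String × String))) (h : ∀ sub ∈ subs, pvInv sub) :
    ∀ x ∈ chars.flatMap (fun c => subs.flatMap (pvBranchB c key)), pvInv x := by
  intro x hx
  rcases List.mem_flatMap.mp hx with ⟨c, _, hx2⟩
  rcases List.mem_flatMap.mp hx2 with ⟨sub, hsub, hx3⟩
  exact pv_branchB_inv c key sub (h sub hsub) x hx3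

theorem pv_helper_eq (tbl : PySem.Dict String (List String)) :
    ∀ (ps : List (String × List String)) (subs : List (List (String × String))),
      (∀ sub ∈ subs, pvInv sub) → (∀ p ∈ ps, tbl.getD p.1 [] = p.2) →
      pvHelperA tbl (ps.map (·.1)) subs =
        ps.foldl (fun subs p =>
          pvDedupB (p.2.flatMap (fun c => subs.flatMap (pvBranchB c p.1))) PySem.Set.empty)
          subs := by
  intro ps
  induction ps with
  | nil => intro subs _ _; rfl
  | cons p rest ih =>
    intro subs hinv hps
    simp only [List.map_cons, List.foldl_cons]
    show pvHelperA tbl (rest.map (·.1)) (pvDedupA (pvStepA tbl p.1 subs)) = _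
    rw [pv_step_eq tbl p.1 p.2 subs (hps p (List.mem_cons_self ..)) hinv, pv_dedup_eq]
    exact ih _
      (fun x hx => pv_stepB_inv p.1 p.2 subs hinv x (pv_mem_dedupB _ _ x hx))
      (fun q hq => hps q (List.mem_cons_of_mem _ hq))

theorem pv_main (table : List (String × List String)) :
    enumerate_l33t_subs table = enumerate_l33t_subs_alt table := by
  unfold enumerate_l33t_subs enumerate_l33t_subs_alt
  show (pvHelperA (PySem.Dict.ofList table) (PySem.Dict.keys (PySem.Dict.ofList table)) [[]]).map
      (fun sub => PySem.Dict.items (sub.foldl (fun dd e => PySem.Dict.insert dd e.1 e.2) PySem.Dict.empty)) =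
    ((PySem.Dict.items (PySem.Dict.ofList table)).foldl
        (fun subs p =>
          pvDedupB (p.2.flatMap (fun c => subs.flatMap (pvBranchB c p.1))) PySem.Set.empty) [[]]).map
      (fun sub => PySem.Dict.items (PySem.Dict.ofList sub))
  have hkeys : PySem.Dict.keys (PySem.Dict.ofList table) =
      (PySem.Dict.items (PySem.Dict.ofList table)).map (·.1) := rfl
  rw [hkeys, pv_helper_eq (PySem.Dict.ofList table) (PySem.Dict.items (PySem.Dict.ofList table)) [[]]
    (by intro sub hsub; simp only [List.mem_cons, List.not_mem_nil, or_false] at hsub; rw [hsub]; exact List.nodup_nil)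
    (by intro q hq
        exact PySem.Dict.getD_of_mem_items (PySem.Dict.ofList table)
          (by exact hq) (PySem.Dict.nodup_keys_ofList table) [])]
  rfl

-- ===== VERDICT (by name: the statement is the Claim_ definition above) =====
theorem enumerate_l33t_subs_spec : Claim_equal_enumerate_l33t_subs := by
  intro table _
  unfold Spec_enumerate_l33t_subs
  exact pv_main table
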